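-- pv_equiv track=rewrite | github.com/NVIDIA/cccl | docs/_ext/auto_api_generator.py | extract_param_summary
-- ===== SOURCE A (Python) =====
-- def extract_param_summary(params):
--     """Extract a simplified parameter summary for section headers."""
--     if not params:
--         return ""
--
--     # Remove template details and namespaces for brevity
--     params = params.strip()
--     if params.startswith("(") and params.endswith(")"):
--         params = params[1:-1]
--
--     # If empty after removing parentheses
--     if not params.strip():
--         return ""
--
--     # Split by comma (handling nested templates/parentheses)
--     param_parts = []
--     depth = 0
--     current = []
--
--     for char in params:
--         if char in "<([":
--             depth += 1
--         elif char in ">)]":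
--             depth -= 1
--         elif char == "," and depth == 0:
--             param_parts.append("".join(current).strip())
--             current = []
--             continue
--         current.append(char)
--
--     if current:
--         param_parts.append("".join(current).strip())
--
--     # Extract parameter names
--     param_names = []
--
--     for param in param_parts:
--         param = param.strip()
--
--         # Special case for execution policy - shorten for readability
--         if "execution_policy_base" in param:
--             param_names.append("exec")
--         else:
--             # Split by spaces and find the parameter name (typically the last word)
--             words = param.split()
--             if words:
--                 # The parameter name is the last word
--                 param_name = words[-1]
--                 # Clean up reference/pointer markers
--                 param_name = param_name.strip("&*,")
--
--                 # Just use the parameter name as-is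
--                 if param_name:
--                     param_names.append(param_name)
--
--     return ", ".join(param_names)
-- ===== SOURCE B (Python) =====
-- def _name_of(part):
--     part = part.strip()
--     if "execution_policy_base" in part:
--         return "exec"
--     words = part.split()
--     if not words:
--         return None
--     return words[-1].strip("&*,")
--
--
-- def extract_param_summary(params):
--     """Extract a simplified parameter summary for section headers."""
--     if not params:
--         return ""
--
--     params = params.strip()
--     if params.startswith("(") and params.endswith(")"):
--         params = params[1:-1]
--
--     if not params.strip():
--         return ""
--
--     # Split on every comma, then merge fragments back together while the
--     # running bracket balance is non-zero; a group is complete when the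
--     # balance returns to 0, so nested template/parenthesis commas are kept.
--     parts = []
--     group = []
--     bal = 0
--     for frag in params.split(','):
--         group.append(frag)
--         bal += sum((c in "<([") - (c in ">)]") for c in frag)
--         if bal == 0:
--             parts.append(",".join(group).strip())
--             group = []
--     if group:
--         parts.append(",".join(group).strip())
--
--     names = [n for n in map(_name_of, parts) if n]
--     return ", ".join(names)
-- ===== Notes on version B (the rewrite author's own statement) =====
-- stated objective: alternative
-- what changed: Replaces the char-by-char depth automaton with split-on-comma followed by merging fragments under a running bracket balance, and replaces the accumulator name loop with a map/filter pipeline.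
import Mathlib
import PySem

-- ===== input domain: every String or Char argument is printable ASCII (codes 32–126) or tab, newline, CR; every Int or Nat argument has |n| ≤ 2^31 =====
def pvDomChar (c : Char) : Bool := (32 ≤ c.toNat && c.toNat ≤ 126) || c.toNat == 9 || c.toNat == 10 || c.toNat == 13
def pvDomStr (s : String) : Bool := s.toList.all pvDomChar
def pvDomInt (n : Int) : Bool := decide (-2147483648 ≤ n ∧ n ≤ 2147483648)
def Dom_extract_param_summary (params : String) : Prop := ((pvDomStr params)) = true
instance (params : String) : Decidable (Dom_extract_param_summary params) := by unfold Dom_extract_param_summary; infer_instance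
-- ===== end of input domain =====

-- B replaces A's char-by-char depth automaton with split-on-comma followed by merging
-- fragments under a running bracket balance, and the accumulator name loop with a
-- map/filter pipeline (alternative decomposition, same cost).

-- ===== PORT A =====
-- state: (depth, param_parts, current); the loop body of A's char loop
def aStep (st : Int × List (List Char) × List Char) (c : Char) : Int × List (List Char) × List Char :=
  let (depth, parts, current) := st
  if c = '<' ∨ c = '(' ∨ c = '[' then (depth + 1, parts, current ++ [c])
  else if c = '>' ∨ c = ')' ∨ c = ']' then (depth - 1, parts, current ++ [c])
  else if c = ',' ∧ depth = 0 then (depth, parts ++ [PySem.Chars.strip current], [])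
  else (depth, parts, current ++ [c])

-- the body of A's name-extraction loop
def aNameStep (names : List (List Char)) (param : List Char) : List (List Char) :=
  let p := PySem.Chars.strip param
  if PySem.Chars.isIn "execution_policy_base".toList p then names ++ ["exec".toList]
  else
    match (PySem.Chars.split₀ p).getLast? with
    | none => names
    | some w =>
      let pn := PySem.Chars.stripChars w ['&', '*', ',']
      if pn ≠ [] then names ++ [pn] else names

def extract_param_summary (params : String) : String :=
  if params.toList = [] then "" else
  let ps := PySem.Chars.strip params.toList
  let ps := if PySem.Chars.startswith ps ['('] && PySem.Chars.endswith ps [')']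
            then PySem.List.slice ps (some 1) (some (-1)) else ps
  if PySem.Chars.strip ps = [] then "" else
  let st := ps.foldl aStep (0, [], [])
  let parts := if st.2.2 ≠ [] then st.2.1 ++ [PySem.Chars.strip st.2.2] else st.2.1
  String.ofList (PySem.Chars.join [',', ' '] (parts.foldl aNameStep []))

-- ===== PORT B =====
-- (c in "<([") - (c in ">)]")
def bWeight (c : Char) : Int :=
  (if c = '<' ∨ c = '(' ∨ c = '[' then 1 else 0) - (if c = '>' ∨ c = ')' ∨ c = ']' then 1 else 0)

-- state: (parts, group, bal); the body of B's fragment loop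
def bStep (st : List (List Char) × List (List Char) × Int) (frag : List Char) :
    List (List Char) × List (List Char) × Int :=
  let (parts, group, bal) := st
  let group := group ++ [frag]
  let bal := bal + (frag.map bWeight).sum
  if bal = 0 then (parts ++ [PySem.Chars.strip (PySem.Chars.join [','] group)], [], bal)
  else (parts, group, bal)

-- _name_of(part): 'exec' / last word stripped of '&*,' / None
def bNameOf (part : List Char) : Option (List Char) :=
  let p := PySem.Chars.strip part
  if PySem.Chars.isIn "execution_policy_base".toList p then some "exec".toList
  else
    match (PySem.Chars.split₀ p).getLast? with
    | none => none
    | some w => some (PySem.Chars.stripChars w ['&', '*', ','])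

def extract_param_summary_alt (params : String) : String :=
  if params.toList = [] then "" else
  let ps := PySem.Chars.strip params.toList
  let ps := if PySem.Chars.startswith ps ['('] && PySem.Chars.endswith ps [')']
            then PySem.List.slice ps (some 1) (some (-1)) else ps
  if PySem.Chars.strip ps = [] then "" else
  let st := (PySem.Chars.splitOn ps [',']).foldl bStep ([], [], 0)
  let parts := if st.2.1 ≠ [] then st.1 ++ [PySem.Chars.strip (PySem.Chars.join [','] st.2.1)] else st.1
  -- [n for n in map(_name_of, parts) if n]
  let names := (parts.map bNameOf).filterMap
      (fun o => match o with | some n => if n = [] then none else some n | none => none)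
  String.ofList (PySem.Chars.join [',', ' '] names)

-- ===== PRECONDITION & SPEC =====
def Spec_extract_param_summary (params : String) (out : String) : Prop := out = extract_param_summary_alt params
instance (params : String) (out : String) : Decidable (Spec_extract_param_summary params out) := by unfold Spec_extract_param_summary; infer_instance

-- ===== CLAIM (what is proved, stated in full; the proofs are below) =====
def Claim_equal_extract_param_summary : Prop := ∀ (params : String), Dom_extract_param_summary params → Spec_extract_param_summary params (extract_param_summary params)

-- ===== LEMMAS AND PROOFS =====

-- proof-side abbreviations
def pvJ (gs : List (List Char)) : List Char := PySem.Chars.join [','] gs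
def pvCurOf (gs : List (List Char)) : List Char := gs.flatMap (fun g => g ++ [','])
def pvBal (f : List Char) : Int := (f.map bWeight).sum

-- reference model of str.split(',') (single-character separator)
def pvSplit : List Char → List (List Char)
  | [] => [[]]
  | c :: rest =>
    if c = ',' then [] :: pvSplit rest
    else
      match pvSplit rest with
      | [] => [[c]]
      | g :: gs => (c :: g) :: gs

lemma pvSplit_ne_nil (cs : List Char) : pvSplit cs ≠ [] := by
  cases cs with
  | nil => simp [pvSplit]
  | cons c rest =>
    simp only [pvSplit]
    split
    · simp
    · split <;> simp

def pvConsHead (pre : List Char) : List (List Char) → List (List Char)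
  | [] => [pre]
  | g :: gs => (pre ++ g) :: gs

lemma pvGo_eq (l : List Char) : ∀ (fuel : Nat) (cur : List Char) (acc : List (List Char)),
    l.length < fuel →
    PySem.Chars.splitOn.go [','] fuel l cur acc = acc.reverse ++ pvConsHead cur.reverse (pvSplit l) := by
  induction l with
  | nil =>
    intro fuel cur acc h
    match fuel with
    | fuel + 1 =>
      rw [PySem.Chars.splitOn.go]
      · simp [pvSplit, pvConsHead]
      · omega
  | cons c rest ih =>
    intro fuel cur acc h
    match fuel with
    | fuel + 1 =>
      rw [PySem.Chars.splitOn.go]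
      have hlen : rest.length < fuel := by simp at h; omega
      by_cases hc : c = ','
      · subst hc
        have hpre : [','].isPrefixOf (',' :: rest) = true := by simp [List.isPrefixOf]
        rw [if_pos hpre]
        have hdrop : List.drop [','].length (',' :: rest) = rest := by simp
        rw [hdrop, ih fuel [] (cur.reverse :: acc) hlen]
        rcases hs : pvSplit rest with _ | ⟨g, gs⟩
        · exact absurd hs (pvSplit_ne_nil rest)
        · simp [pvSplit, pvConsHead, hs]
      · have hpre : [','].isPrefixOf (c :: rest) = false := by
          simp [List.isPrefixOf]
          exact fun h => absurd h.symm hc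
        rw [if_neg (by simp [hpre])]
        rw [ih fuel (c :: cur) acc hlen]
        rcases hs : pvSplit rest with _ | ⟨g, gs⟩
        · exact absurd hs (pvSplit_ne_nil rest)
        · simp [pvSplit, pvConsHead, hs, hc]

lemma pvSplitOn_eq (cs : List Char) : PySem.Chars.splitOn cs [','] = pvSplit cs := by
  have h := pvGo_eq cs (cs.length + 1) [] [] (by omega)
  rw [PySem.Chars.splitOn, h]
  rcases hs : pvSplit cs with _ | ⟨g, gs⟩
  · exact absurd hs (pvSplit_ne_nil cs)
  · simp [pvConsHead]

lemma pvJ_split (cs : List Char) : pvJ (pvSplit cs) = cs := by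
  induction cs with
  | nil => simp [pvSplit, pvJ, PySem.Chars.join_singleton]
  | cons c rest ih =>
    simp only [pvSplit]
    by_cases hc : c = ','
    · rw [if_pos hc]
      rcases hs : pvSplit rest with _ | ⟨g, gs⟩
      · exact absurd hs (pvSplit_ne_nil rest)
      · rw [hs] at ih
        subst hc
        simp only [pvJ, PySem.Chars.join_cons_cons]
        simp only [pvJ] at ih
        simp [ih]
    · rw [if_neg hc]
      rcases hs : pvSplit rest with _ | ⟨g, gs⟩
      · exact absurd hs (pvSplit_ne_nil rest)
      · rw [hs] at ih
        cases gs with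
        | nil =>
          simp only [pvJ, PySem.Chars.join_singleton] at ih ⊢
          simp [ih]
        | cons g2 gs2 =>
          simp only [pvJ, PySem.Chars.join_cons_cons] at ih ⊢
          simp [ih]

lemma pvSplit_comma_free (cs : List Char) : ∀ f ∈ pvSplit cs, ',' ∉ f := by
  induction cs with
  | nil => simp [pvSplit]
  | cons c rest ih =>
    intro f hf
    simp only [pvSplit] at hf
    by_cases hc : c = ','
    · rw [if_pos hc] at hf
      rcases List.mem_cons.mp hf with rfl | hf
      · simp
      · exact ih f hf
    · rw [if_neg hc] at hf
      rcases hs : pvSplit rest with _ | ⟨g, gs⟩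
      · exact absurd hs (pvSplit_ne_nil rest)
      · rw [hs] at hf
        rcases List.mem_cons.mp hf with rfl | hf
        · intro hm
          rcases List.mem_cons.mp hm with hm | hm
          · exact hc hm.symm
          · exact ih g (by rw [hs]; exact List.mem_cons_self) hm
        · exact ih f (by rw [hs]; exact List.mem_cons_of_mem _ hf)

lemma pvCurOf_append (gs : List (List Char)) (f : List Char) :
    pvCurOf gs ++ f = pvJ (gs ++ [f]) := by
  induction gs with
  | nil => simp [pvCurOf, pvJ, PySem.Chars.join_singleton]
  | cons g gs' ih =>
    cases gs' with
    | nil => simp [pvCurOf, pvJ, PySem.Chars.join_cons_cons, PySem.Chars.join_singleton]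
    | cons g2 gs2 =>
      simp only [pvCurOf, List.flatMap_cons] at ih ⊢
      simp only [pvJ, List.cons_append, PySem.Chars.join_cons_cons] at ih ⊢
      simp [← ih]

lemma pvCurOf_eq_nil {gs : List (List Char)} (h : pvCurOf gs = []) : gs = [] := by
  cases gs with
  | nil => rfl
  | cons g gs' => simp [pvCurOf] at h

lemma pv_foldA_frag (f : List Char) (hf : ',' ∉ f) :
    ∀ (d : Int) (parts : List (List Char)) (cur : List Char),
    f.foldl aStep (d, parts, cur) = (d + pvBal f, parts, cur ++ f) := by
  induction f with
  | nil => intro d parts cur; simp [pvBal]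
  | cons c rest ih =>
    intro d parts cur
    have hc : c ≠ ',' := fun h => hf (by simp [h])
    have hrest : ',' ∉ rest := fun h => hf (by simp [h])
    have hbal : pvBal (c :: rest) = bWeight c + pvBal rest := by simp [pvBal]
    simp only [List.foldl_cons]
    by_cases h1 : c = '<' ∨ c = '(' ∨ c = '['
    · have hw : bWeight c = 1 := by rcases h1 with rfl | rfl | rfl <;> decide
      rw [show aStep (d, parts, cur) c = (d + 1, parts, cur ++ [c]) from by simp [aStep, h1]]
      rw [ih hrest, hbal, hw]
      have h3 : (cur ++ [c]) ++ rest = cur ++ (c :: rest) := by simp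
      rw [h3]
      congr 1
      omega
    · by_cases h2 : c = '>' ∨ c = ')' ∨ c = ']'
      · have hw : bWeight c = -1 := by rcases h2 with rfl | rfl | rfl <;> decide
        rw [show aStep (d, parts, cur) c = (d - 1, parts, cur ++ [c]) from by simp [aStep, h1, h2]]
        rw [ih hrest, hbal, hw]
        have h3 : (cur ++ [c]) ++ rest = cur ++ (c :: rest) := by simp
        rw [h3]
        congr 1
        omega
      · have hw : bWeight c = 0 := by simp [bWeight, h1, h2]
        rw [show aStep (d, parts, cur) c = (d, parts, cur ++ [c]) from by
          simp [aStep, h1, h2, hc]]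
        rw [ih hrest, hbal, hw]
        have h3 : (cur ++ [c]) ++ rest = cur ++ (c :: rest) := by simp
        rw [h3]
        congr 1
        omega

lemma pv_bStep_pos (parts group : List (List Char)) (d : Int) (f : List Char)
    (h : d + pvBal f = 0) :
    bStep (parts, group, d) f
      = (parts ++ [PySem.Chars.strip (pvJ (group ++ [f]))], [], d + pvBal f) := by
  have h' : d + (f.map bWeight).sum = 0 := by simpa [pvBal] using h
  simp [bStep, pvBal, pvJ, h']

lemma pv_bStep_neg (parts group : List (List Char)) (d : Int) (f : List Char)
    (h : d + pvBal f ≠ 0) :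
    bStep (parts, group, d) f = (parts, group ++ [f], d + pvBal f) := by
  have h' : ¬ d + (f.map bWeight).sum = 0 := by simpa [pvBal] using h
  simp [bStep, pvBal, h']

lemma pv_aStep_comma_zero (parts : List (List Char)) (cur : List Char) :
    aStep (0, parts, cur) ',' = (0, parts ++ [PySem.Chars.strip cur], []) := by
  simp [aStep]

lemma pv_aStep_comma_ne (parts : List (List Char)) (cur : List Char) {d : Int} (h : d ≠ 0) :
    aStep (d, parts, cur) ',' = (d, parts, cur ++ [',']) := by
  simp [aStep, h]

lemma pv_strip_nil : PySem.Chars.strip ([] : List Char) = [] := by decide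

-- A-side / B-side finishing of the parts accumulation
def pvFinA (st : Int × List (List Char) × List Char) : List (List Char) :=
  if st.2.2 ≠ [] then st.2.1 ++ [PySem.Chars.strip st.2.2] else st.2.1
def pvFinB (st : List (List Char) × List (List Char) × Int) : List (List Char) :=
  if st.2.1 ≠ [] then st.1 ++ [PySem.Chars.strip (pvJ st.2.1)] else st.1

lemma pv_main (fs : List (List Char)) : ∀ (f : List Char), (∀ g ∈ f :: fs, ',' ∉ g) →
    ∀ (d : Int) (parts group : List (List Char)), (group = [] → d = 0) →
    pvFinB ((f :: fs).foldl bStep (parts, group, d))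
      = pvFinA ((pvJ (f :: fs)).foldl aStep (d, parts, pvCurOf group)) ∨
    pvFinB ((f :: fs).foldl bStep (parts, group, d))
      = pvFinA ((pvJ (f :: fs)).foldl aStep (d, parts, pvCurOf group)) ++ [[]] := by
  induction fs with
  | nil =>
    intro f hcf d parts group hg
    have hfold := pv_foldA_frag f (hcf f (by simp)) d parts (pvCurOf group)
    have hJ : pvJ [f] = f := PySem.Chars.join_singleton _ _
    rw [List.foldl_cons, List.foldl_nil, hJ, hfold]
    have hcur : pvCurOf group ++ f = pvJ (group ++ [f]) := pvCurOf_append group f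
    by_cases hb : d + pvBal f = 0
    · rw [pv_bStep_pos parts group d f hb]
      by_cases hnil : pvCurOf group ++ f = []
      · right
        have h0 : pvJ (group ++ [f]) = [] := hcur ▸ hnil
        simp [pvFinA, pvFinB, hnil, h0, pv_strip_nil]
      · left
        have h0 : pvJ (group ++ [f]) ≠ [] := hcur ▸ hnil
        simp [pvFinA, pvFinB, hcur, h0]
    · rw [pv_bStep_neg parts group d f hb]
      have hnil : pvCurOf group ++ f ≠ [] := by
        intro hn
        rcases List.append_eq_nil_iff.mp hn with ⟨h1, h2⟩
        exact hb (by rw [h2, hg (pvCurOf_eq_nil h1)]; simp [pvBal])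
      left
      have h0 : pvJ (group ++ [f]) ≠ [] := hcur ▸ hnil
      simp [pvFinA, pvFinB, hcur, h0]
  | cons f2 fs' ih =>
    intro f hcf d parts group hg
    have hcf2 : ∀ g ∈ f2 :: fs', ',' ∉ g := fun g hgm => hcf g (by simp [hgm])
    have hJc : pvJ (f :: f2 :: fs') = (f ++ [',']) ++ pvJ (f2 :: fs') := by
      simp [pvJ, PySem.Chars.join_cons_cons]
    rw [List.foldl_cons, hJc, List.foldl_append, List.foldl_append]
    have hfold := pv_foldA_frag f (hcf f (by simp)) d parts (pvCurOf group)
    rw [hfold]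
    rw [show List.foldl aStep (d + pvBal f, parts, pvCurOf group ++ f) [',']
        = aStep (d + pvBal f, parts, pvCurOf group ++ f) ',' from rfl]
    have hcur : pvCurOf group ++ f = pvJ (group ++ [f]) := pvCurOf_append group f
    by_cases hb : d + pvBal f = 0
    · rw [pv_bStep_pos parts group d f hb, hb, pv_aStep_comma_zero, hcur]
      have := ih f2 hcf2 0 (parts ++ [PySem.Chars.strip (pvJ (group ++ [f]))]) [] (fun _ => rfl)
      simpa [pvCurOf] using this
    · rw [pv_bStep_neg parts group d f hb, pv_aStep_comma_ne parts _ hb]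
      have hcur2 : (pvCurOf group ++ f) ++ [','] = pvCurOf (group ++ [f]) := by
        simp [pvCurOf]
      rw [hcur2]
      exact ih f2 hcf2 (d + pvBal f) parts (group ++ [f]) (by simp)

-- name extraction: per-part contribution
def pvGName (p : List Char) : List (List Char) :=
  match bNameOf p with
  | none => []
  | some n => if n = [] then [] else [n]

lemma pv_aNameStep_eq (acc : List (List Char)) (p : List Char) :
    aNameStep acc p = acc ++ pvGName p := by
  simp only [aNameStep, pvGName, bNameOf]
  split
  · simp
  · rcases hlast : (PySem.Chars.split₀ (PySem.Chars.strip p)).getLast? with _ | w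
    · simp
    · by_cases hn : PySem.Chars.stripChars w ['&', '*', ','] = []
      · simp [hn]
      · simp [hn]

lemma pv_names_A (parts : List (List Char)) (acc : List (List Char)) :
    parts.foldl aNameStep acc = acc ++ parts.flatMap pvGName := by
  rw [PySem.List.foldl_congr_mem parts aNameStep (fun a p => a ++ pvGName p) acc
      (fun a p _ => pv_aNameStep_eq a p)]
  exact PySem.List.foldl_append_eq_flatMap _ _ _

lemma pv_names_B (parts : List (List Char)) :
    (parts.map bNameOf).filterMap
        (fun o => match o with | some n => if n = [] then none else some n | none => none)
      = parts.flatMap pvGName := by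
  induction parts with
  | nil => rfl
  | cons p rest ih =>
    simp only [List.map_cons, List.filterMap_cons, List.flatMap_cons, pvGName]
    rcases hb : bNameOf p with _ | n
    · simpa using ih
    · by_cases hn : n = []
      · simp [hn, ih]
      · simp [hn, ih]

lemma pv_gname_nil : pvGName [] = [] := by decide

-- the whole pipeline after the shared preprocessing
lemma pv_core (cs : List Char) :
    PySem.Chars.join [',', ' ']
        ((pvFinA (cs.foldl aStep (0, [], []))).foldl aNameStep [])
      = PySem.Chars.join [',', ' ']
        (((pvFinB ((PySem.Chars.splitOn cs [',']).foldl bStep ([], [], 0))).map bNameOf).filterMap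
          (fun o => match o with | some n => if n = [] then none else some n | none => none)) := by
  obtain ⟨f, fs', hfs⟩ : ∃ f fs', pvSplit cs = f :: fs' := by
    rcases h : pvSplit cs with _ | ⟨f, fs⟩
    · exact absurd h (pvSplit_ne_nil cs)
    · exact ⟨_, _, rfl⟩
  rw [pvSplitOn_eq, hfs]
  have hfree : ∀ g ∈ f :: fs', ',' ∉ g := by
    rw [← hfs]; exact pvSplit_comma_free cs
  have hmain := pv_main fs' f hfree 0 [] [] (fun _ => rfl)
  have hJ : pvJ (f :: fs') = cs := by rw [← hfs]; exact pvJ_split cs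
  rw [hJ] at hmain
  simp only [pvCurOf, List.flatMap_nil] at hmain
  rw [pv_names_A, pv_names_B]
  rcases hmain with h | h
  · rw [h]
    simp
  · rw [h]
    simp [pv_gname_nil]

-- ===== VERDICT (by name: the statement is the Claim_ definition above) =====
theorem extract_param_summary_spec : Claim_equal_extract_param_summary := by
  intro params _
  unfold Spec_extract_param_summary extract_param_summary extract_param_summary_alt
  by_cases h0 : params.toList = []
  · simp [h0]
  · rw [if_neg h0, if_neg h0]
    dsimp only
    by_cases hs : PySem.Chars.strip
        (if (PySem.Chars.startswith (PySem.Chars.strip params.toList) ['('] &&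
              PySem.Chars.endswith (PySem.Chars.strip params.toList) [')']) = true
         then PySem.List.slice (PySem.Chars.strip params.toList) (some 1) (some (-1))
         else PySem.Chars.strip params.toList) = []
    · rw [if_pos hs, if_pos hs]
    · rw [if_neg hs, if_neg hs]
      exact congrArg String.ofList (pv_core _)
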